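-- pv_equiv track=rewrite | github.com/fdhgh/fiveoclock | somewhere.py | strip_location
-- ===== SOURCE A (Python) =====
-- def strip_location(locationa):
-- 	locationb = locationa.replace("_"," ")
-- 	occurrences = locationb.count("/")
-- 	preposition = "in "
--
-- 	if occurrences == 2:
-- 		s1 = locationb.find("/")
-- 		state = locationb[s1+1:]
-- 		s2 = state.find("/")
-- 		city = state[s2+1:]
-- 		state = state[:s2]
-- 		locationc = city + ", " + state
-- 	else:
-- 		while occurrences>1:
-- 			s = locationb.find("/")
-- 			if s>=0:
-- 				locationb = locationb[s+1:]
-- 				occurrences = locationb.count("/")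
-- 			else: occurrences=0
-- 		s = locationb.find("/")
-- 		locationc = locationb[s+1:]
-- 		country = locationb[:s]
--
-- 	if locationc in ["Eastern","Central","Pacific","Mountain","Atlantic"]:
-- 		s = locationb.find("/")
-- 		country = locationb[:s]
-- 		locationc = locationc + " " + country
--
-- 	if locationc in ["Easter"]:
-- 		locationc  = locationc + " Island"
-- 		preposition = "on "
--
-- 	if locationc in ["Canary"]:
-- 		locationc  = "the " + locationc + " Islands"
--
-- 	if locationc[:4] in ["Isle"]:
-- 		preposition = "on the "
--
-- 	if locationc[:3] in ["St "]:
-- 		locationc = "St. " + locationc[3:]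
--
-- 	if locationb[:10] in ["Antarctica"]: # case for Antarctic research stations ["Casey","Casey","Davis","DumontDUrville","Macquarie","Mawson","McMurdo","Palmer","Rothera","Syowa","Troll","Vostok"]:
-- 		preposition = "at the "
-- 		if locationc in ["DumontDUrville"]:
-- 			locationc = "Dumont d'Urville Research Station, Antarctica"
-- 		elif locationc in ["Macquarie"]:
-- 			locationc = "Macquarie Island Research Station, Antarctica"
-- 		else:
-- 			locationc = locationc + " Research Station, Antarctica"
--
-- 	stringl = preposition + locationc
--
-- 	return stringl
-- ===== SOURCE B (Python) =====
-- def strip_location(locationa):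
--     lb = locationa.replace("_", " ")
--     parts = lb.split("/")
--     if len(parts) == 3:
--         base = lb
--         locationc = parts[2] + ", " + parts[1]
--     else:
--         base = "/".join(parts[-2:])
--         locationc = parts[-1]
--
--     antarctic = base[:10] == "Antarctica"
--     if antarctic:
--         preposition = "at the "
--     elif locationc[:4] == "Isle":
--         preposition = "on the "
--     elif locationc == "Easter":
--         preposition = "on "
--     else:
--         preposition = "in "
--
--     if locationc in ("Eastern", "Central", "Pacific", "Mountain", "Atlantic"):
--         locationc = locationc + " " + base[:base.find("/")]
--     elif locationc == "Easter":
--         locationc = locationc + " Island"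
--     elif locationc == "Canary":
--         locationc = "the Canary Islands"
--     elif locationc[:3] == "St ":
--         locationc = "St. " + locationc[3:]
--
--     if antarctic:
--         if locationc == "DumontDUrville":
--             locationc = "Dumont d'Urville Research Station, Antarctica"
--         elif locationc == "Macquarie":
--             locationc = "Macquarie Island Research Station, Antarctica"
--         else:
--             locationc = locationc + " Research Station, Antarctica"
--
--     return preposition + locationc
-- ===== Notes on version B (the rewrite author's own statement) =====
-- stated objective: simpler
-- what changed: B replaces A's repeated find/count/slice while-loop with a single split on the slash separator plus list indexing (parts[2]/parts[1], parts[-1], joining the last two parts), and reorganises A's six sequential fixup rewrites into two disjoint if/elif chains (one choosing the preposition from the raw name, one rewriting the name), proved to interact identically.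
import Mathlib
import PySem

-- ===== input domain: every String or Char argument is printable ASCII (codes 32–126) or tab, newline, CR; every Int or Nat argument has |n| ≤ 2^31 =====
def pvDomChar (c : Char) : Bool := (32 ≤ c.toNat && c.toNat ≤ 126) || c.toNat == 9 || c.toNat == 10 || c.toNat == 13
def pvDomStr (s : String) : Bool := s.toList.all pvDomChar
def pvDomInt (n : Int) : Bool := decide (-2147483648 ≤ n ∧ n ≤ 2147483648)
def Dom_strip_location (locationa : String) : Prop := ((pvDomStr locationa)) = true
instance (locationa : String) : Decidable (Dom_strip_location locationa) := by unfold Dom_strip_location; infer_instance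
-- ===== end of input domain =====

-- B replaces A's repeated find/count/slice while-loop by one split('/') plus list indexing,
-- and A's sequential fixup rewrites by two disjoint if/elif chains (objective: simpler).

-- ===== PORT A =====
-- the 'while occurrences>1' loop of A; fuel = len(locationb)+1 strictly exceeds the
-- possible number of iterations (each one shortens locationb), so fuel never runs out
def pvALoop : Nat → String → Nat → String
  | 0, locationb, _ => locationb
  | fuel+1, locationb, occurrences =>
    if occurrences > 1 then
      let s := PySem.Str.find locationb "/"
      if 0 ≤ s then
        let locationb := PySem.Str.slice locationb (some (s+1)) none
        pvALoop fuel locationb (PySem.Str.count locationb "/")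
      else
        pvALoop fuel locationb 0
    else locationb

-- A's fixup tail, line for line in A's order (locationc/preposition shadowed like Python rebinding)
def pvAFix (locationb locationc preposition : String) : String :=
  let locationc :=
    if locationc ∈ ["Eastern","Central","Pacific","Mountain","Atlantic"] then
      let s := PySem.Str.find locationb "/"
      let country := PySem.Str.slice locationb none (some s)
      locationc ++ " " ++ country
    else locationc
  let lp : String × String :=
    if locationc ∈ ["Easter"] then (locationc ++ " Island", "on ") else (locationc, preposition)
  let locationc := lp.1
  let preposition := lp.2
  let locationc := if locationc ∈ ["Canary"] then "the " ++ locationc ++ " Islands" else locationc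
  let preposition := if PySem.Str.slice locationc none (some 4) ∈ ["Isle"] then "on the " else preposition
  let locationc :=
    if PySem.Str.slice locationc none (some 3) ∈ ["St "] then
      "St. " ++ PySem.Str.slice locationc (some 3) none
    else locationc
  let lp : String × String :=
    if PySem.Str.slice locationb none (some 10) ∈ ["Antarctica"] then
      (if locationc ∈ ["DumontDUrville"] then "Dumont d'Urville Research Station, Antarctica"
       else if locationc ∈ ["Macquarie"] then "Macquarie Island Research Station, Antarctica"
       else locationc ++ " Research Station, Antarctica",
       "at the ")
    else (locationc, preposition)
  lp.2 ++ lp.1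

def strip_location (locationa : String) : String :=
  let locationb := PySem.Str.replace locationa "_" " "
  let occurrences := PySem.Str.count locationb "/"
  let preposition := "in "
  if occurrences == 2 then
    let s1 := PySem.Str.find locationb "/"
    let state := PySem.Str.slice locationb (some (s1+1)) none
    let s2 := PySem.Str.find state "/"
    let city := PySem.Str.slice state (some (s2+1)) none
    let state := PySem.Str.slice state none (some s2)
    let locationc := city ++ ", " ++ state
    pvAFix locationb locationc preposition
  else
    let locationb := pvALoop ((PySem.Str.len locationb).toNat + 1) locationb occurrences
    let s := PySem.Str.find locationb "/"
    let locationc := PySem.Str.slice locationb (some (s+1)) none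
    let _country := PySem.Str.slice locationb none (some s)  -- A computes 'country' here; it is dead
    pvAFix locationb locationc preposition

-- ===== PORT B =====
-- B's fixups: preposition and name chosen by two independent if/elif chains
def pvBFix (base locationc : String) : String :=
  let antarctic := PySem.Str.slice base none (some 10) = "Antarctica"
  let preposition :=
    if antarctic then "at the "
    else if PySem.Str.slice locationc none (some 4) = "Isle" then "on the "
    else if locationc = "Easter" then "on "
    else "in "
  let locationc :=
    if locationc ∈ ["Eastern","Central","Pacific","Mountain","Atlantic"] then
      locationc ++ " " ++ PySem.Str.slice base none (some (PySem.Str.find base "/"))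
    else if locationc = "Easter" then locationc ++ " Island"
    else if locationc = "Canary" then "the Canary Islands"
    else if PySem.Str.slice locationc none (some 3) = "St " then
      "St. " ++ PySem.Str.slice locationc (some 3) none
    else locationc
  let locationc :=
    if antarctic then
      if locationc = "DumontDUrville" then "Dumont d'Urville Research Station, Antarctica"
      else if locationc = "Macquarie" then "Macquarie Island Research Station, Antarctica"
      else locationc ++ " Research Station, Antarctica"
    else locationc
  preposition ++ locationc

def strip_location_alt (locationa : String) : String :=
  let lb := PySem.Str.replace locationa "_" " "
  let parts := (PySem.Str.split? lb "/").getD []   -- sep "/" is nonempty, so split? is always `some`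
  let bl : String × String :=
    if parts.length == 3 then
      (lb, ((PySem.List.pyGet? parts 2).getD "") ++ ", " ++ ((PySem.List.pyGet? parts 1).getD ""))
    else
      (PySem.Str.join "/" (PySem.List.slice parts (some (-2)) none),
       (PySem.List.pyGet? parts (-1)).getD "")   -- parts is never empty, so parts[-1] exists
  pvBFix bl.1 bl.2

-- ===== PRECONDITION & SPEC =====
def Spec_strip_location (locationa : String) (out : String) : Prop := out = strip_location_alt locationa
instance (locationa : String) (out : String) : Decidable (Spec_strip_location locationa out) := by unfold Spec_strip_location; infer_instance

-- ===== CLAIM (what is proved, stated in full; the proofs are below) =====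
def Claim_equal_strip_location : Prop := ∀ (locationa : String), Dom_strip_location locationa → Spec_strip_location locationa (strip_location locationa)

-- ===== LEMMAS AND PROOFS =====

-- list-level models of split('/'), count('/'), find('/')
def spF : List Char → List (List Char)
  | [] => [[]]
  | c :: t => if c = '/' then [] :: spF t else (spF t).modifyHead (c :: ·)

def ctF : List Char → Nat
  | [] => 0
  | c :: t => (if c = '/' then 1 else 0) + ctF t

def fdF : List Char → Int
  | [] => -1
  | c :: t => if c = '/' then 0 else (if fdF t = -1 then -1 else fdF t + 1)

lemma count_go_cons (fuel acc : Nat) (c : Char) (t : List Char) :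
    PySem.Chars.count.go ['/'] (fuel+1) (c :: t) acc =
      if c = '/' then PySem.Chars.count.go ['/'] fuel t (acc+1)
      else PySem.Chars.count.go ['/'] fuel t acc := by
  simp only [PySem.Chars.count.go, List.isPrefixOf, Bool.and_true, List.drop_succ_cons, beq_iff_eq, List.length_cons]
  by_cases hc : c = '/' <;> simp [hc, eq_comm]
lemma find_go_cons (k : Nat) (c : Char) (t : List Char) :
    PySem.Chars.find.go ['/'] (c :: t) k =
      if c = '/' then (k : Int) else PySem.Chars.find.go ['/'] t (k+1) := by
  simp only [PySem.Chars.find.go, List.isPrefixOf, Bool.and_true, beq_iff_eq]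
  by_cases hc : c = '/' <;> simp [hc, eq_comm]
lemma splitOn_go_cons (fuel : Nat) (c : Char) (t cur : List Char) (acc : List (List Char)) :
    PySem.Chars.splitOn.go ['/'] (fuel+1) (c :: t) cur acc =
      if c = '/' then PySem.Chars.splitOn.go ['/'] fuel t [] (cur.reverse :: acc)
      else PySem.Chars.splitOn.go ['/'] fuel t (c :: cur) acc := by
  simp only [PySem.Chars.splitOn.go, List.isPrefixOf, Bool.and_true, beq_iff_eq,
    List.drop_succ_cons, List.drop_zero, List.length]
  by_cases hc : c = '/' <;> simp [hc, eq_comm]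

lemma count_go_slash (t : List Char) : ∀ (fuel acc : Nat), t.length ≤ fuel →
    PySem.Chars.count.go ['/'] fuel t acc = acc + ctF t := by
  induction t with
  | nil => intro fuel acc _; cases fuel <;> simp [PySem.Chars.count.go, ctF]
  | cons c t ih =>
    intro fuel acc h
    cases fuel with
    | zero => simp at h
    | succ fuel =>
      rw [count_go_cons]
      have hle : t.length ≤ fuel := by simpa using h
      by_cases hc : c = '/' <;> simp [hc, ih fuel _ hle, ctF] <;> omega
lemma count_slash (s : List Char) : PySem.Chars.count s ['/'] = ctF s := by
  rw [PySem.Chars.count]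
  simp [count_go_slash s s.length 0 le_rfl]

lemma neg_one_le_fdF (t : List Char) : -1 ≤ fdF t := by
  induction t with
  | nil => simp [fdF]
  | cons c t ih =>
    rw [fdF]
    by_cases hc : c = '/'
    · simp [hc]
    · by_cases hf : fdF t = -1 <;> simp [hc, hf] <;> omega

lemma find_go_slash (t : List Char) : ∀ (k : Nat),
    PySem.Chars.find.go ['/'] t k = if fdF t = -1 then -1 else k + fdF t := by
  induction t with
  | nil => intro k; simp [PySem.Chars.find.go, fdF]
  | cons c t ih =>
    intro k
    rw [find_go_cons]
    by_cases hc : c = '/'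
    · simp [hc, fdF]
    · rw [ih (k+1), fdF]
      by_cases hf : fdF t = -1
      · simp [hc, hf]
      · have h1 : ¬(fdF t + 1 = -1) := by have := neg_one_le_fdF t; omega
        simp only [hc, if_false, hf, h1]
        push_cast; ring
lemma find_slash (s : List Char) : PySem.Chars.find s ['/'] = fdF s := by
  rw [PySem.Chars.find, find_go_slash]
  by_cases hf : fdF s = -1 <;> simp [hf]

lemma splitOn_go_slash (t : List Char) : ∀ (fuel : Nat) (cur : List Char) (acc : List (List Char)),
    t.length ≤ fuel →
    PySem.Chars.splitOn.go ['/'] fuel t cur acc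
      = acc.reverse ++ (spF t).modifyHead (cur.reverse ++ ·) := by
  induction t with
  | nil => intro fuel cur acc _; cases fuel <;> simp [PySem.Chars.splitOn.go, spF]
  | cons c t ih =>
    intro fuel cur acc h
    cases fuel with
    | zero => simp at h
    | succ fuel =>
      rw [splitOn_go_cons]
      have hle : t.length ≤ fuel := by simpa using h
      by_cases hc : c = '/'
      · rw [if_pos hc, ih fuel [] _ hle, spF]
        simp only [hc, if_true, List.reverse_nil, List.nil_append]
        cases spF t <;> simp
      · rw [if_neg hc, ih fuel (c :: cur) acc hle, spF]
        simp only [hc, if_false]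
        congr 1
        cases hsp : spF t with
        | nil => simp
        | cons a l => simp
lemma splitOn_slash (s : List Char) : PySem.Chars.splitOn s ['/'] = spF s := by
  rw [PySem.Chars.splitOn, splitOn_go_slash s _ [] [] (by omega)]
  cases hsp : spF s with
  | nil => simp
  | cons a l => simp

lemma spF_ne_nil (s : List Char) : spF s ≠ [] := by
  induction s with
  | nil => simp [spF]
  | cons c t ih =>
    rw [spF]
    by_cases hc : c = '/'
    · simp [hc]
    · simp only [hc, if_false]
      cases hsp : spF t with
      | nil => exact absurd hsp ih
      | cons a l => simp

lemma length_spF (s : List Char) : (spF s).length = ctF s + 1 := by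
  induction s with
  | nil => simp [spF, ctF]
  | cons c t ih =>
    rw [spF, ctF]
    by_cases hc : c = '/' <;> simp [hc, ih] <;> omega

lemma noslash_spF (s : List Char) : ∀ p ∈ spF s, '/' ∉ p := by
  induction s with
  | nil => simp [spF]
  | cons c t ih =>
    rw [spF]
    by_cases hc : c = '/'
    · simp only [hc, if_true]
      intro p hp
      rcases List.mem_cons.mp hp with h1 | h1
      · subst h1; simp
      · exact ih p h1
    · simp only [hc, if_false]
      intro p hp
      cases hsp : spF t with
      | nil => rw [hsp] at hp; simp at hp
      | cons a l =>
        rw [hsp] at hp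
        simp only [List.modifyHead_cons, List.mem_cons] at hp
        rcases hp with hp | hp
        · subst hp
          intro hm
          rcases List.mem_cons.mp hm with hm | hm
          · exact hc hm.symm
          · exact ih a (by simp [hsp]) hm
        · exact ih p (by simp [hsp, hp])

lemma intercalate_spF (s : List Char) : (['/'] : List Char).intercalate (spF s) = s := by
  induction s with
  | nil => simp [spF, List.intercalate]
  | cons c t ih =>
    rw [spF]
    by_cases hc : c = '/'
    · subst hc
      simp only [if_true]
      cases hsp : spF t with
      | nil => exact absurd hsp (spF_ne_nil t)
      | cons a l =>
        rw [hsp] at ih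
        simp only [List.intercalate] at ih ⊢
        simp at ih ⊢
        simpa using ih
    · simp only [hc, if_false]
      cases hsp : spF t with
      | nil => exact absurd hsp (spF_ne_nil t)
      | cons a l =>
        rw [hsp] at ih
        simp only [List.modifyHead_cons]
        simp only [List.intercalate] at ih ⊢
        cases l with
        | nil => simpa using congrArg (c :: ·) ih
        | cons b m =>
          simp only [List.intersperse] at ih ⊢
          simpa using congrArg (c :: ·) ih

lemma fdF_noslash (p : List Char) (h : '/' ∉ p) : fdF p = -1 := by
  induction p with
  | nil => simp [fdF]
  | cons c t ih =>
    rw [fdF]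
    have hc : ¬ c = '/' := fun hc => h (by simp [hc])
    simp [hc, ih (fun hm => h (List.mem_cons_of_mem _ hm))]

lemma spF_noslash (p : List Char) (h : '/' ∉ p) : spF p = [p] := by
  induction p with
  | nil => simp [spF]
  | cons c t ih =>
    rw [spF]
    have hc : ¬ c = '/' := fun hc => h (by simp [hc])
    simp [hc, ih (fun hm => h (List.mem_cons_of_mem _ hm))]

lemma fdF_concat (p r : List Char) (h : '/' ∉ p) : fdF (p ++ '/' :: r) = (p.length : Int) := by
  induction p with
  | nil => simp [fdF]
  | cons c t ih =>
    have hc : ¬ c = '/' := fun hc => h (by simp [hc])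
    have iht := ih (fun hm => h (List.mem_cons_of_mem _ hm))
    rw [List.cons_append, fdF, iht]
    have : ¬ ((t.length : Int) = -1) := by omega
    simp [hc, this]

lemma ctF_zero (s : List Char) (h : ctF s = 0) : fdF s = -1 ∧ spF s = [s] := by
  have hns : '/' ∉ s := by
    intro hm
    induction s with
    | nil => simp at hm
    | cons c t ih =>
      rw [ctF] at h
      rcases List.mem_cons.mp hm with h1 | h1
      · simp [h1.symm] at h
      · exact ih (by omega) h1
  exact ⟨fdF_noslash s hns, spF_noslash s hns⟩

lemma spF_step (s : List Char) (h : ctF s ≠ 0) :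
    ∃ p r, s = p ++ '/' :: r ∧ '/' ∉ p ∧ spF s = p :: spF r ∧ ctF s = ctF r + 1 := by
  induction s with
  | nil => simp [ctF] at h
  | cons c t ih =>
    by_cases hc : c = '/'
    · refine ⟨[], t, by simp [hc], by simp, ?_, ?_⟩
      · rw [spF]; simp [hc]
      · rw [ctF]; simp [hc]; omega
    · have ht : ctF t ≠ 0 := by
        rw [ctF] at h; simpa [hc] using h
      obtain ⟨p, r, hs, hp, hsp, hct⟩ := ih ht
      refine ⟨c :: p, r, by simp [hs], ?_, ?_, ?_⟩
      · intro hm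
        rcases List.mem_cons.mp hm with h1 | h1
        · exact hc h1.symm
        · exact hp h1
      · rw [spF, hs] at *
        simp [hc, hsp]
      · rw [ctF, hct]
        simp [hc]

lemma slice_neg_two {α : Type} (xs : List α) :
    PySem.List.slice xs (some (-2)) none = xs.drop (xs.length - 2) := by
  rw [PySem.List.slice, PySem.List.clampIdx]
  simp only [if_pos (by omega : (-2 : Int) < 0)]
  by_cases h : (xs.length : Int) + (-2) < 0
  · rw [if_pos h]
    have : xs.length - 2 = 0 := by omega
    simp [this]
  · rw [if_neg h]
    have h2 : ((xs.length : Int) + (-2)).toNat = xs.length - 2 := by omega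
    rw [h2]
    exact List.take_of_length_le (by simp [List.length_drop])

lemma slash_toList : ("/" : String).toList = ['/'] := by decide

lemma str_count_slash (s : String) : PySem.Str.count s "/" = ctF s.toList := by
  rw [PySem.Str.count_eq, slash_toList, count_slash]

lemma str_find_slash (s : String) : PySem.Str.find s "/" = fdF s.toList := by
  rw [PySem.Str.find_eq, slash_toList, find_slash]

lemma str_slice_drop (s : String) (k : Nat) :
    (PySem.Str.slice s (some ((k : Int) + 1)) none).toList = s.toList.drop (k + 1) := by
  rw [PySem.Str.toList_slice, PySem.Chars.slice_eq_listSlice]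
  have : ((k : Int) + 1) = ((k + 1 : Nat) : Int) := by push_cast; ring
  rw [this, PySem.List.slice_from _ (by positivity)]
  simp

lemma loop_eq : ∀ (fuel : Nat) (s : String), s.toList.length < fuel →
    pvALoop fuel s (ctF s.toList)
      = String.ofList ((['/'] : List Char).intercalate
          ((spF s.toList).drop ((spF s.toList).length - 2))) := by
  intro fuel
  induction fuel with
  | zero => intro s h; omega
  | succ fuel ih =>
    intro s h
    rw [pvALoop]
    by_cases h1 : ctF s.toList > 1
    · rw [if_pos h1]
      have hne : ctF s.toList ≠ 0 := by omega
      obtain ⟨p, r, hs, hp, hsp, hct⟩ := spF_step s.toList hne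
      have hfd : PySem.Str.find s "/" = (p.length : Int) := by
        rw [str_find_slash, hs]
        exact fdF_concat p r hp
      rw [hfd, if_pos (by positivity)]
      have hdrop : (PySem.Str.slice s (some ((p.length : Int) + 1)) none).toList = r := by
        rw [str_slice_drop, hs]
        have : p ++ '/' :: r = (p ++ ['/']) ++ r := by simp
        rw [this]
        have hl : (p ++ ['/']).length = p.length + 1 := by simp
        rw [← hl, List.drop_left]
      set s' := PySem.Str.slice s (some ((p.length : Int) + 1)) none with hs'
      show pvALoop fuel s' (PySem.Str.count s' "/") = _
      rw [str_count_slash, hdrop]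
      have hlen : s'.toList.length < fuel := by
        rw [hdrop]
        have : s.toList.length = p.length + 1 + r.length := by rw [hs]; simp; omega
        omega
      have := ih s' (by rw [hdrop] at hlen ⊢; exact hlen)
      rw [hdrop] at this
      rw [this]
      congr 2
      rw [hsp]
      have hl2 : (spF r).length = ctF r + 1 := length_spF r
      have hge : ctF r ≥ 1 := by omega
      rw [length_spF r]
      simp only [List.length_cons, hl2]
      have e1 : ctF r + 1 + 1 - 2 = (ctF r + 1 - 2) + 1 := by omega
      rw [e1, List.drop_succ_cons]
    · rw [if_neg h1]
      have : (spF s.toList).length - 2 = 0 := by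
        rw [length_spF]; omega
      rw [this, List.drop_zero, intercalate_spF, String.ofList_toList]

lemma str_slice_take (s : String) (k : Int) (h : 0 ≤ k) :
    (PySem.Str.slice s none (some k)).toList = s.toList.take k.toNat := by
  rw [PySem.Str.toList_slice, PySem.Chars.slice_eq_listSlice, PySem.List.slice_to _ h]

lemma append_ne (u v t : String) (h : t.toList.length < u.toList.length) : u ++ v ≠ t := by
  intro he
  rw [String.ext_iff, String.toList_append] at he
  have := congrArg List.length he
  rw [List.length_append] at this
  omega

lemma slice_append_lit (u v : String) (k : Int) (hk : 0 ≤ k) (h : k.toNat ≤ u.toList.length) :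
    PySem.Str.slice (u ++ v) none (some k) = PySem.Str.slice u none (some k) := by
  rw [String.ext_iff, str_slice_take _ _ hk, str_slice_take _ _ hk, String.toList_append,
    List.take_append_of_le_length h]

lemma slice3 (s : String) : (PySem.Str.slice s none (some 3)).toList = s.toList.take 3 := by
  rw [str_slice_take _ _ (by norm_num), show ((3:Int)).toNat = 3 from rfl]

lemma slice4 (s : String) : (PySem.Str.slice s none (some 4)).toList = s.toList.take 4 := by
  rw [str_slice_take _ _ (by norm_num), show ((4:Int)).toNat = 4 from rfl]

lemma len_append_lit (u v : String) : (u ++ v).toList.length = u.toList.length + v.toList.length := by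
  rw [String.toList_append, List.length_append]

-- name+prep core: A's sequential fixups equal B's two chains
lemma fix_eq (b l : String) : pvAFix b l "in " = pvBFix b l := by
  rw [pvAFix, pvBFix]
  simp only [List.mem_cons, List.not_mem_nil, or_false]
  by_cases hz : l = "Eastern" ∨ l = "Central" ∨ l = "Pacific" ∨ l = "Mountain" ∨ l = "Atlantic"
  · rw [if_pos hz, if_pos hz]
    set c := PySem.Str.slice b none (some (PySem.Str.find b "/")) with hc
    have hlen : 7 ≤ l.toList.length := by rcases hz with rfl|rfl|rfl|rfl|rfl <;> decide
    have h4 : l.toList.take 4 ≠ ("Isle" : String).toList := by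
      rcases hz with rfl|rfl|rfl|rfl|rfl <;> decide
    have h3 : l.toList.take 3 ≠ ("St " : String).toList := by
      rcases hz with rfl|rfl|rfl|rfl|rfl <;> decide
    have hEl : ¬ (l = "Easter") := by rcases hz with rfl|rfl|rfl|rfl|rfl <;> decide
    have e1 : ("Easter" : String).toList.length = 6 := by decide
    have e2 : ("Canary" : String).toList.length = 6 := by decide
    have e3 : (" " : String).toList.length = 1 := by decide
    have hE : (l ++ " ") ++ c ≠ "Easter" := by
      apply append_ne; rw [len_append_lit]; omega
    have hC : (l ++ " ") ++ c ≠ "Canary" := by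
      apply append_ne; rw [len_append_lit]; omega
    have hI' : PySem.Str.slice ((l ++ " ") ++ c) none (some 4) ≠ "Isle" := by
      rw [slice_append_lit _ _ 4 (by norm_num) (by rw [show ((4:Int)).toNat = 4 from rfl, len_append_lit]; omega)]
      intro h
      rw [String.ext_iff, slice4, String.toList_append,
          List.take_append_of_le_length (by omega)] at h
      exact h4 h
    have hS' : PySem.Str.slice ((l ++ " ") ++ c) none (some 3) ≠ "St " := by
      rw [slice_append_lit _ _ 3 (by norm_num) (by rw [show ((3:Int)).toNat = 3 from rfl, len_append_lit]; omega)]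
      intro h
      rw [String.ext_iff, slice3, String.toList_append,
          List.take_append_of_le_length (by omega)] at h
      exact h3 h
    have hI0 : PySem.Str.slice l none (some 4) ≠ "Isle" := by
      intro h
      rw [String.ext_iff, slice4] at h
      exact h4 h
    by_cases han : PySem.Str.slice b none (some 10) = "Antarctica" <;>
      simp [han, hE, hC, hI', hS', hI0, hEl]
  · rw [if_neg hz, if_neg hz]
    by_cases he : l = "Easter"
    · subst he
      have h1 : ("Easter Island" : String) ≠ "Canary" := by decide
      have h2 : PySem.Str.slice ("Easter Island" : String) none (some 4) ≠ "Isle" := by decide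
      have h3 : PySem.Str.slice ("Easter Island" : String) none (some 3) ≠ "St " := by decide
      have h4 : PySem.Str.slice ("Easter" : String) none (some 4) ≠ "Isle" := by decide
      have h5 : ("Easter Island" : String) ≠ "DumontDUrville" := by decide
      have h6 : ("Easter Island" : String) ≠ "Macquarie" := by decide
      by_cases han : PySem.Str.slice b none (some 10) = "Antarctica" <;>
        simp [han, h1, h2, h3, h4, h5, h6]
    · by_cases hca : l = "Canary"
      · subst hca
        have h1 : PySem.Str.slice ("the Canary Islands" : String) none (some 4) ≠ "Isle" := by decide
        have h2 : PySem.Str.slice ("the Canary Islands" : String) none (some 3) ≠ "St " := by decide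
        have h3 : PySem.Str.slice ("Canary" : String) none (some 4) ≠ "Isle" := by decide
        have h5 : ("the Canary Islands" : String) ≠ "DumontDUrville" := by decide
        have h6 : ("the Canary Islands" : String) ≠ "Macquarie" := by decide
        by_cases han : PySem.Str.slice b none (some 10) = "Antarctica" <;>
          simp [han, h1, h2, h3, h5, h6, he]
      · by_cases hst : PySem.Str.slice l none (some 3) = "St "
        · by_cases han : PySem.Str.slice b none (some 10) = "Antarctica" <;>
            simp [han, he, hca, hst]
        · by_cases han : PySem.Str.slice b none (some 10) = "Antarctica" <;>
            simp [han, he, hca, hst]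


-- B-side bridges
lemma parts_eq (lb : String) :
    (PySem.Str.split? lb "/").getD [] = (spF lb.toList).map String.ofList := by
  rw [PySem.Str.split?, PySem.Chars.split?]
  simp [slash_toList, splitOn_slash]

lemma join_toList (ps : List String) :
    (PySem.Str.join "/" ps).toList = (['/'] : List Char).intercalate (ps.map String.toList) := by
  rw [PySem.Str.toList_join, slash_toList, PySem.Chars.join]

-- ===== MAIN PROOF =====
theorem strip_location_spec_aux (la : String) : strip_location la = strip_location_alt la := by
  simp only [strip_location, strip_location_alt, parts_eq, str_count_slash]
  set lb := PySem.Str.replace la "_" " " with hlb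
  set cs := lb.toList with hcs
  have hL : (List.map String.ofList (spF cs)).length = ctF cs + 1 := by
    simp [length_spF]
  by_cases h2 : ctF cs = 2
  · -- exactly two '/': the occurrences == 2 branch vs the len(parts) == 3 branch
    have hc2 : (ctF cs == 2) = true := by simp [h2]
    have hc3 : ((List.map String.ofList (spF cs)).length == 3) = true := by simp [hL, h2]
    rw [if_pos (by rw [hc2]), if_pos (by rw [hc3])]
    simp only []
    obtain ⟨p0, p1, p2, hsp3⟩ := List.length_eq_three.mp (by rw [length_spF, h2] : (spF cs).length = 3)
    have hp0 : '/' ∉ p0 := noslash_spF cs p0 (by rw [hsp3]; simp)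
    have hp1 : '/' ∉ p1 := noslash_spF cs p1 (by rw [hsp3]; simp)
    have hcs_eq : cs = p0 ++ '/' :: (p1 ++ '/' :: p2) := by
      conv_lhs => rw [← intercalate_spF cs]
      rw [hsp3]
      simp [List.intercalate, List.intersperse]
    have hf1 : PySem.Str.find lb "/" = (p0.length : Int) := by
      rw [str_find_slash, ← hcs, hcs_eq]; exact fdF_concat _ _ hp0
    rw [hf1]
    have hstate : (PySem.Str.slice lb (some ((p0.length : Int)+1)) none).toList = p1 ++ '/' :: p2 := by
      rw [str_slice_drop, ← hcs, hcs_eq,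
        show p0 ++ '/' :: (p1 ++ '/' :: p2) = (p0 ++ ['/']) ++ (p1 ++ '/' :: p2) from by simp,
        show p0.length + 1 = (p0 ++ ['/']).length from by simp]
      exact List.drop_left
    set st := PySem.Str.slice lb (some ((p0.length : Int)+1)) none with hstdef
    have hf2 : PySem.Str.find st "/" = (p1.length : Int) := by
      rw [str_find_slash, hstate]; exact fdF_concat _ _ hp1
    rw [hf2]
    have hcity : (PySem.Str.slice st (some ((p1.length : Int)+1)) none).toList = p2 := by
      rw [str_slice_drop, hstate,
        show p1 ++ '/' :: p2 = (p1 ++ ['/']) ++ p2 from by simp,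
        show p1.length + 1 = (p1 ++ ['/']).length from by simp]
      exact List.drop_left
    have hst2 : (PySem.Str.slice st none (some (p1.length : Int))).toList = p1 := by
      rw [str_slice_take _ _ (by positivity), hstate]
      simp [List.take_left']
    have hg2 : (PySem.List.pyGet? (List.map String.ofList (spF cs)) 2).getD "" = String.ofList p2 := by
      rw [hsp3]; simp [PySem.List.pyGet?, PySem.List.pyIdx?]
    have hg1 : (PySem.List.pyGet? (List.map String.ofList (spF cs)) 1).getD "" = String.ofList p1 := by
      rw [hsp3]; simp [PySem.List.pyGet?, PySem.List.pyIdx?]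
    rw [hg2, hg1]
    have hlc : PySem.Str.slice st (some ((p1.length : Int)+1)) none ++ ", " ++
        PySem.Str.slice st none (some (p1.length : Int))
        = String.ofList p2 ++ ", " ++ String.ofList p1 := by
      rw [String.ext_iff]
      simp only [String.toList_append, hcity, hst2, String.toList_ofList]
    rw [hlc, fix_eq]
  · -- the while-loop branch vs the last-two-parts branch
    have hc2 : (ctF cs == 2) = false := by simp [h2]
    have hc3 : ((List.map String.ofList (spF cs)).length == 3) = false := by simp [hL, h2]
    rw [if_neg (by rw [hc2]; simp), if_neg (by rw [hc3]; simp)]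
    simp only []
    have hfuel : cs.length < (PySem.Str.len lb).toNat + 1 := by
      rw [PySem.Str.len_eq]; simp [hcs]
    rw [loop_eq _ _ hfuel]
    set q := (spF cs).drop ((spF cs).length - 2) with hqdef
    have hparts_drop : PySem.List.slice (List.map String.ofList (spF cs)) (some (-2)) none
        = List.map String.ofList q := by
      rw [slice_neg_two, List.length_map, ← List.map_drop]
    rw [hparts_drop]
    by_cases h0 : ctF cs = 0
    · -- no '/' at all
      have hsp1 : spF cs = [cs] := (ctF_zero cs h0).2
      have hq1 : q = [cs] := by rw [hqdef, hsp1]; simp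
      have hjoin1 : (['/'] : List Char).intercalate q = cs := by
        rw [hq1]; simp [List.intercalate]
      rw [hjoin1]
      have hfd : PySem.Str.find (String.ofList cs) "/" = -1 := by
        rw [str_find_slash, String.toList_ofList]; exact (ctF_zero cs h0).1
      rw [hfd]
      have hlcA : PySem.Str.slice (String.ofList cs) (some (-1 + 1)) none = String.ofList cs := by
        rw [String.ext_iff, show (-1 : Int) + 1 = 0 from by norm_num,
          PySem.Str.toList_slice, PySem.Chars.slice_eq_listSlice,
          PySem.List.slice_from _ (by norm_num : (0:Int) ≤ 0)]
        simp
      rw [hlcA]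
      have hbase : PySem.Str.join "/" (List.map String.ofList q) = String.ofList cs := by
        rw [String.ext_iff, join_toList, hq1]
        simp [List.intercalate]
      rw [hbase]
      have hlcB : (PySem.List.pyGet? (List.map String.ofList (spF cs)) (-1)).getD ""
          = String.ofList cs := by
        rw [hsp1]; simp [PySem.List.pyGet?, PySem.List.pyIdx?]
      rw [hlcB, fix_eq]
    · -- at least one '/': the loop keeps the last two fields
      have hL2 : 2 ≤ (spF cs).length := by rw [length_spF]; omega
      have hlq : q.length = 2 := by rw [hqdef, List.length_drop]; omega
      obtain ⟨p, r, hq2⟩ := List.length_eq_two.mp hlq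
      have hqsub : ∀ x ∈ q, x ∈ spF cs := by
        intro x hx
        rw [hqdef] at hx
        exact List.drop_subset _ _ hx
      have hpmem : p ∈ spF cs := hqsub p (by rw [hq2]; simp)
      have hrmem : r ∈ spF cs := hqsub r (by rw [hq2]; simp)
      have hp : '/' ∉ p := noslash_spF cs p hpmem
      have hr : '/' ∉ r := noslash_spF cs r hrmem
      have hint : (['/'] : List Char).intercalate q = p ++ '/' :: r := by
        rw [hq2]; simp [List.intercalate, List.intersperse]
      rw [hint]
      have hfd : PySem.Str.find (String.ofList (p ++ '/' :: r)) "/" = (p.length : Int) := by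
        rw [str_find_slash, String.toList_ofList]; exact fdF_concat _ _ hp
      rw [hfd]
      have hlcA : (PySem.Str.slice (String.ofList (p ++ '/' :: r)) (some ((p.length : Int) + 1)) none)
          = String.ofList r := by
        rw [String.ext_iff, str_slice_drop, String.toList_ofList, String.toList_ofList,
          show p ++ '/' :: r = (p ++ ['/']) ++ r from by simp,
          show p.length + 1 = (p ++ ['/']).length from by simp]
        exact List.drop_left
      rw [hlcA]
      have hbase : PySem.Str.join "/" (List.map String.ofList q) = String.ofList (p ++ '/' :: r) := by
        rw [String.ext_iff, join_toList, hq2, String.toList_ofList]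
        simp [List.intercalate, List.intersperse]
      rw [hbase]
      have hlcB : (PySem.List.pyGet? (List.map String.ofList (spF cs)) (-1)).getD ""
          = String.ofList r := by
        have hLL : (List.map String.ofList (spF cs)).length = (spF cs).length := by simp
        have hdropm : (List.map String.ofList (spF cs)).drop ((spF cs).length - 2)
            = [String.ofList p, String.ofList r] := by
          have h2' := congrArg (List.map String.ofList) hq2
          rw [hqdef, List.map_drop] at h2'
          simpa using h2'
        have hget : (List.map String.ofList (spF cs))[(spF cs).length - 1]?
            = some (String.ofList r) := by
          have h3 := List.getElem?_drop (xs := List.map String.ofList (spF cs))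
            (i := (spF cs).length - 2) (j := 1)
          rw [hdropm] at h3
          rw [show (spF cs).length - 1 = (spF cs).length - 2 + 1 from by omega, ← h3]
          rfl
        rw [PySem.List.pyGet?, PySem.List.pyIdx?, hLL]
        rw [if_neg (by omega), if_pos (by push_cast; omega)]
        rw [show ((-(-1 : Int)).toNat) = 1 from by norm_num]
        rw [Option.bind_some, hget]
        rfl
      rw [hlcB, fix_eq]


-- ===== VERDICT (by name: the statement is the Claim_ definition above) =====
theorem strip_location_spec : Claim_equal_strip_location := by
  intro la _
  exact strip_location_spec_aux la
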